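-- pv_equiv track=rewrite | github.com/Myrmecos/projectsAsTransferProof | restrictionEnzyme/res_E.py | has_between_lst
-- ===== SOURCE A (Python) =====
-- def has_between_lst(cutLst, rangeLst):
--     #takes a list of fragment sizes and a list of length size range (e.g. [[100, 250], [250, 500]])
--     #return a dictionary of [size_range]: number of fragment
--     dic = {}
--     for i in rangeLst:
--         i = tuple(i)
--         dic[i] = 0
--         for j in cutLst:
--             if (j >= i[0] and j < i[1]) or (j <= i[0] and j >= i[1]):
--                 dic[i] += 1
--     return dic
-- ===== SOURCE B (Python) =====
-- def _bisect(s, x, right):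
--     # index of the first element of sorted list s that is >= x (right=False)
--     # or > x (right=True), by binary search
--     lo, hi = 0, len(s)
--     while lo < hi:
--         m = (lo + hi) // 2
--         if (s[m] <= x) if right else (s[m] < x):
--             lo = m + 1
--         else:
--             hi = m
--     return lo
--
--
-- def has_between_lst(cutLst, rangeLst):
--     s = sorted(cutLst)
--     dic = {}
--     for r in rangeLst:
--         a, b = r[0], r[1]
--         if a < b:
--             cnt = _bisect(s, b, False) - _bisect(s, a, False)
--         else:
--             cnt = _bisect(s, a, True) - _bisect(s, b, False)
--         dic[tuple(r)] = cnt
--     return dic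
-- ===== Notes on version B (the rewrite author's own statement) =====
-- stated objective: faster
-- what changed: Instead of scanning all of cutLst once per range (O(R*N)), B sorts cutLst once and answers each range with two hand-written binary searches (bisect_left/bisect_right style), splitting the forward case [a,b) and the reversed inclusive case [b,a]; Pre_ excludes range entries shorter than 2 elements, on which A raises IndexError except when cutLst is empty (A skips the indexing and accidentally returns 0) while B always indexes the range and raises.
-- outside the precondition, e.g. on has_between_lst([], [[5]]): A returns {(5,): 0}, B raises IndexError; on has_between_lst([1], [[5]]): A raises IndexError, B raises IndexError
import Mathlib
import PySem

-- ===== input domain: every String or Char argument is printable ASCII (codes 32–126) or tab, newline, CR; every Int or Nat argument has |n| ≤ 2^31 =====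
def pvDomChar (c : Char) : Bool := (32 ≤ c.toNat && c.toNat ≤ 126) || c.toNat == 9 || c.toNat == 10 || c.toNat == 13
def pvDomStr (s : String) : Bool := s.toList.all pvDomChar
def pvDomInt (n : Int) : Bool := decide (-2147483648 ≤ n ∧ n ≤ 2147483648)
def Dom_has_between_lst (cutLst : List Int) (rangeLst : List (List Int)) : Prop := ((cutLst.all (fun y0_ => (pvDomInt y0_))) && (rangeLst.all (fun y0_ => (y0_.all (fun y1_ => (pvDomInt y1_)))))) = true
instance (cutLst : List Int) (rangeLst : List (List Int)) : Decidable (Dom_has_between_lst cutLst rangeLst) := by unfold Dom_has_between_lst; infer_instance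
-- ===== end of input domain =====

-- B sorts cutLst once and counts each range with two binary searches instead of A's per-range scan of cutLst (asymptotically faster).

-- ===== PORT A =====
-- inner loop: dic[i] = 0 then for j in cutLst: if …: dic[i] += 1  (key i is always present, so modify is exact)
def has_between_lst (cutLst : List Int) (rangeLst : List (List Int)) : List (List Int × Int) :=
  (rangeLst.foldl (fun dic i =>
      let dic := dic.insert i (0 : Int)
      cutLst.foldl (fun dic j =>
        if (PySem.List.pyGetD i 0 0 ≤ j ∧ j < PySem.List.pyGetD i 1 0) ∨
           (j ≤ PySem.List.pyGetD i 0 0 ∧ PySem.List.pyGetD i 1 0 ≤ j)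
        then dic.modify i 0 (· + 1) else dic) dic)
    PySem.Dict.empty).items

-- ===== PORT B =====
-- _bisect(s, x, right): binary-search loop from Source B, transliterated
def pvBisectLoop (s : List Int) (x : Int) (right : Bool) (lo hi : Int) : Int :=
  if _h : lo < hi then
    let m := PySem.Int.floordiv (lo + hi) 2
    if (if right then PySem.List.pyGetD s m 0 ≤ x else PySem.List.pyGetD s m 0 < x)
    then pvBisectLoop s x right (m + 1) hi
    else pvBisectLoop s x right lo m
  else lo
termination_by (hi - lo).toNat
decreasing_by
  · have h1 : lo ≤ PySem.Int.floordiv (lo + hi) 2 :=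
      (PySem.Int.le_floordiv_iff_mul_le (by omega)).2 (by omega)
    omega
  · have h2 : PySem.Int.floordiv (lo + hi) 2 < hi :=
      (PySem.Int.floordiv_lt_iff_lt_mul (by omega)).2 (by omega)
    omega

def pvBisect (s : List Int) (x : Int) (right : Bool) : Int :=
  pvBisectLoop s x right 0 (PySem.List.len s)

def has_between_lst_alt (cutLst : List Int) (rangeLst : List (List Int)) : List (List Int × Int) :=
  let s := PySem.List.sorted cutLst (fun v => v) false
  (rangeLst.foldl (fun dic r =>
      let a := PySem.List.pyGetD r 0 0
      let b := PySem.List.pyGetD r 1 0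
      let cnt := if a < b then pvBisect s b false - pvBisect s a false
                 else pvBisect s a true - pvBisect s b false
      dic.insert r cnt)
    PySem.Dict.empty).items

-- ===== PRECONDITION & SPEC =====
-- Pre_ excludes range entries shorter than 2 elements: there A raises IndexError, except when cutLst is empty, where A never indexes the range and accidentally returns 0 while B always indexes r[0], r[1] and raises.
def Pre_has_between_lst (cutLst : List Int) (rangeLst : List (List Int)) : Prop :=
  ∀ r ∈ rangeLst, 2 ≤ r.length
instance (cutLst : List Int) (rangeLst : List (List Int)) : Decidable (Pre_has_between_lst cutLst rangeLst) := by unfold Pre_has_between_lst; infer_instance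
def pvWitness_has_between_lst : List Int × List (List Int) := ([3, 1, 7, 3], [[1, 5], [5, 1], [3, 3]])

def Spec_has_between_lst (cutLst : List Int) (rangeLst : List (List Int)) (out : List (List Int × Int)) : Prop := out = has_between_lst_alt cutLst rangeLst
instance (cutLst : List Int) (rangeLst : List (List Int)) (out : List (List Int × Int)) : Decidable (Spec_has_between_lst cutLst rangeLst out) := by unfold Spec_has_between_lst; infer_instance

-- ===== CLAIM (what is proved, stated in full; the proofs are below) =====
def Claim_equal_has_between_lst : Prop := ∀ (cutLst : List Int) (rangeLst : List (List Int)), Dom_has_between_lst cutLst rangeLst → Pre_has_between_lst cutLst rangeLst → Spec_has_between_lst cutLst rangeLst (has_between_lst cutLst rangeLst)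

-- ===== LEMMAS AND PROOFS =====

-- In a sorted list, a downward-closed predicate holds exactly on the first countP positions.
theorem pv_countP_char (p : Int → Bool) (hmono : ∀ u v : Int, u ≤ v → p v → p u) :
    ∀ (s : List Int), s.Pairwise (· ≤ ·) →
      ∀ (k : Nat) (hk : k < s.length), (p s[k] = true ↔ k < s.countP p) := by
  intro s
  induction s with
  | nil => intro _ k hk; simp at hk
  | cons h t ih =>
    intro hs k hk
    have hh := (List.pairwise_cons.1 hs).1
    have ht := (List.pairwise_cons.1 hs).2
    by_cases hp : p h = true
    · cases k with
      | zero => simp [List.countP_cons, hp]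
      | succ k =>
        have hk' : k < t.length := by simpa using hk
        have hch := ih ht k hk'
        simp only [List.countP_cons, hp, List.getElem_cons_succ, if_true]
        rw [hch]
        omega
    · have ht0 : t.countP p = 0 := by
        rw [List.countP_eq_zero]
        intro j hj hpj
        exact hp (hmono h j (hh j hj) hpj)
      have hc : (h :: t).countP p = 0 := by
        simp [hp, ht0]
      rw [hc]
      constructor
      · intro hpk
        exfalso
        cases k with
        | zero => exact hp (by simpa using hpk)
        | succ k =>
          have hk' : k < t.length := by simpa using hk
          have : t.countP p ≠ 0 := by
            have := (ih ht k hk').1 (by simpa using hpk)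
            omega
          exact this ht0
      · omega

-- The binary-search loop computes countP of its comparison predicate on a sorted list.
theorem pvBisectLoop_eq (s : List Int) (x : Int) (right : Bool)
    (hs : s.Pairwise (· ≤ ·)) :
    ∀ (n : Nat) (lo hi : Int), (hi - lo).toNat = n → 0 ≤ lo → hi ≤ (s.length : Int) →
      lo ≤ (s.countP (fun j => if right then j ≤ x else j < x) : Int) →
      (s.countP (fun j => if right then j ≤ x else j < x) : Int) ≤ hi →
      pvBisectLoop s x right lo hi = (s.countP (fun j => if right then j ≤ x else j < x) : Int) := by
  intro n
  induction n using Nat.strong_induction_on with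
  | _ n ih =>
    intro lo hi hn hlo hhi hlc hch
    set p : Int → Bool := fun j => if right then j ≤ x else j < x with hp
    by_cases hlh : lo < hi
    · rw [pvBisectLoop]
      simp only [hlh, dif_pos]
      set m := PySem.Int.floordiv (lo + hi) 2 with hm
      have h1 : lo ≤ m := (PySem.Int.le_floordiv_iff_mul_le (by omega)).2 (by omega)
      have h2 : m < hi := (PySem.Int.floordiv_lt_iff_lt_mul (by omega)).2 (by omega)
      have hmlen : m < (s.length : Int) := by omega
      have hget : PySem.List.pyGetD s m 0 = s[m.toNat]'(by omega) :=
        PySem.List.pyGetD_eq_getElem s 0 (by omega) hmlen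
      have hchar := pv_countP_char p
        (by
          intro u v huv hpv
          simp only [hp] at hpv ⊢
          cases right <;> simp_all <;> omega)
        s hs m.toNat (by omega)
      by_cases hc : p (s[m.toNat]'(by omega)) = true
      · have hlt : (m.toNat : Int) < (s.countP p : Int) := by
          have := hchar.1 hc
          omega
        have hcond : (if right then PySem.List.pyGetD s m 0 ≤ x else PySem.List.pyGetD s m 0 < x) = true := by
          rw [hget]; simpa [hp] using hc
        rw [if_pos (by simpa using hcond)]
        exact ih (hi - (m + 1)).toNat (by omega) (m + 1) hi rfl (by omega) hhi (by omega) hch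
      · have hge : (s.countP p : Int) ≤ (m.toNat : Int) := by
          have : ¬ m.toNat < s.countP p := fun h => hc (hchar.2 h)
          omega
        have hcond : ¬ (if right then PySem.List.pyGetD s m 0 ≤ x else PySem.List.pyGetD s m 0 < x) := by
          rw [hget]; intro h
          exact hc (by cases right <;> simpa [hp] using h)
        rw [if_neg (by simpa using hcond)]
        exact ih (m - lo).toNat (by omega) lo m rfl hlo (by omega) hlc (by omega)
    · rw [pvBisectLoop]
      simp only [hlh, dif_neg, not_false_iff]
      omega

theorem pvBisect_eq (s : List Int) (x : Int) (right : Bool) (hs : s.Pairwise (· ≤ ·)) :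
    pvBisect s x right = (s.countP (fun j => if right then j ≤ x else j < x) : Int) := by
  have h1 : (s.countP (fun j => if right then j ≤ x else j < x)) ≤ s.length :=
    List.countP_le_length
  unfold pvBisect
  rw [PySem.List.len_eq]
  exact pvBisectLoop_eq s x right hs (((s.length : Int) - 0)).toNat 0 (s.length : Int) rfl
    (by omega) (by omega) (by omega) (by exact_mod_cast h1)

-- Counting decompositions of A's OR-predicate, forward and reversed case.
theorem pv_count_split_lt (l : List Int) (a b : Int) (hab : a < b) :
    l.countP (fun j => decide ((a ≤ j ∧ j < b) ∨ (j ≤ a ∧ b ≤ j)))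
      + l.countP (fun j => decide (j < a)) = l.countP (fun j => decide (j < b)) := by
  induction l with
  | nil => simp
  | cons h t ih =>
    simp only [List.countP_cons, decide_eq_true_eq]
    split_ifs <;> omega

theorem pv_count_split_ge (l : List Int) (a b : Int) (hab : ¬ a < b) :
    l.countP (fun j => decide ((a ≤ j ∧ j < b) ∨ (j ≤ a ∧ b ≤ j)))
      + l.countP (fun j => decide (j < b)) = l.countP (fun j => decide (j ≤ a)) := by
  induction l with
  | nil => simp
  | cons h t ih =>
    simp only [List.countP_cons, decide_eq_true_eq]
    split_ifs <;> omega

-- A's inner loop starting from dic with a fresh 0 at key i produces insert i (countP pred cutLst).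
theorem pv_inner_fold (cut : List Int) (p : Int → Prop) [DecidablePred p]
    (i : List Int) :
    ∀ (d : PySem.Dict (List Int) Int) (c : Int),
      cut.foldl (fun dic j => if p j then dic.modify i 0 (· + 1) else dic) (d.insert i c)
        = d.insert i (c + (cut.countP (fun j => decide (p j)) : Int)) := by
  induction cut with
  | nil => intro d c; simp
  | cons h t ih =>
    intro d c
    simp only [List.foldl_cons, List.countP_cons]
    by_cases hp : p h
    · rw [if_pos hp]
      have hmod : (d.insert i c).modify i 0 (· + 1) = d.insert i (c + 1) := by
        unfold PySem.Dict.modify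
        rw [PySem.Dict.getD_insert_self, PySem.Dict.insert_insert_self]
      rw [hmod, ih]
      simp [hp]
      ring_nf
    · rw [if_neg hp, ih]
      simp [hp]

-- B's per-range count equals A's per-range count.
theorem pv_count_eq (cut : List Int) (r : List Int) :
    (if PySem.List.pyGetD r 0 0 < PySem.List.pyGetD r 1 0 then
        pvBisect (PySem.List.sorted cut (fun v => v) false) (PySem.List.pyGetD r 1 0) false
          - pvBisect (PySem.List.sorted cut (fun v => v) false) (PySem.List.pyGetD r 0 0) false
      else
        pvBisect (PySem.List.sorted cut (fun v => v) false) (PySem.List.pyGetD r 0 0) true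
          - pvBisect (PySem.List.sorted cut (fun v => v) false) (PySem.List.pyGetD r 1 0) false)
      = (cut.countP (fun j => decide ((PySem.List.pyGetD r 0 0 ≤ j ∧ j < PySem.List.pyGetD r 1 0)
          ∨ (j ≤ PySem.List.pyGetD r 0 0 ∧ PySem.List.pyGetD r 1 0 ≤ j))) : Int) := by
  set a := PySem.List.pyGetD r 0 0
  set b := PySem.List.pyGetD r 1 0
  set s := PySem.List.sorted cut (fun v => v) false with hsdef
  have hs : s.Pairwise (· ≤ ·) := by
    have := PySem.List.sorted_pairwise cut (fun v => v)
    simpa [hsdef] using this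
  have hperm : s.Perm cut := PySem.List.sorted_perm cut (fun v => v) false
  have hcb : s.countP (fun j => decide (j < b)) = cut.countP (fun j => decide (j < b)) :=
    hperm.countP_eq _
  have hca : s.countP (fun j => decide (j < a)) = cut.countP (fun j => decide (j < a)) :=
    hperm.countP_eq _
  have hcla : s.countP (fun j => decide (j ≤ a)) = cut.countP (fun j => decide (j ≤ a)) :=
    hperm.countP_eq _
  by_cases hab : a < b
  · rw [if_pos hab, pvBisect_eq s b false hs, pvBisect_eq s a false hs]
    have hsplit := pv_count_split_lt cut a b hab
    simp only [Bool.false_eq_true, if_false] at *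
    rw [hcb, hca]
    omega
  · rw [if_neg hab, pvBisect_eq s a true hs, pvBisect_eq s b false hs]
    have hsplit := pv_count_split_ge cut a b hab
    simp only [Bool.false_eq_true, if_false, if_true] at *
    rw [hcla, hcb]
    omega

theorem pv_fold_eq (cut : List Int) (rl : List (List Int)) :
    ∀ (d : PySem.Dict (List Int) Int),
      rl.foldl (fun dic i =>
          cut.foldl (fun dic j =>
            if (PySem.List.pyGetD i 0 0 ≤ j ∧ j < PySem.List.pyGetD i 1 0) ∨
               (j ≤ PySem.List.pyGetD i 0 0 ∧ PySem.List.pyGetD i 1 0 ≤ j)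
            then dic.modify i 0 (· + 1) else dic) (dic.insert i (0 : Int))) d
      = rl.foldl (fun dic r =>
          dic.insert r
            (if PySem.List.pyGetD r 0 0 < PySem.List.pyGetD r 1 0 then
                pvBisect (PySem.List.sorted cut (fun v => v) false) (PySem.List.pyGetD r 1 0) false
                  - pvBisect (PySem.List.sorted cut (fun v => v) false) (PySem.List.pyGetD r 0 0) false
              else
                pvBisect (PySem.List.sorted cut (fun v => v) false) (PySem.List.pyGetD r 0 0) true
                  - pvBisect (PySem.List.sorted cut (fun v => v) false) (PySem.List.pyGetD r 1 0) false)) d := by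
  induction rl with
  | nil => intro d; rfl
  | cons r t ih =>
    intro d
    simp only [List.foldl_cons]
    rw [pv_inner_fold cut _ r d 0, pv_count_eq cut r, ih]
    simp

-- ===== VERDICT (by name: the statement is the Claim_ definition above) =====
theorem has_between_lst_spec : Claim_equal_has_between_lst := by
  intro cutLst rangeLst _ _
  unfold Spec_has_between_lst has_between_lst has_between_lst_alt
  rw [pv_fold_eq]
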